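-- pv_equiv track=rewrite | github.com/franciscoerramuspe/leetcode-solutions | problems/arrays/degreeOfAnArray.py | degreeOfArray
-- ===== SOURCE A (Python) =====
-- def degreeOfArray(nums):
--     counter = {}
--     for num in nums:
--         if num not in counter:
--             counter[num] = 1
--         else:
--             counter[num]+=1
--
--     max_value = max(counter.values())
--     # Get all key-value pairs with the highest value
--     results = [(key, value) for key, value in counter.items() if value == max_value]
--
--     ans=float("inf")
--     for result in results:
--         num, k = result[0], result[1]
--         l, r = 0, 0
--         while k > 0:
--             # [1,2,2,3,1]
--             if nums[l] != num and nums[r] != num: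
--                 l+=1
--                 r+=1
--             elif nums[r] == num and nums[l] == num:
--                 k-=1
--                 r+=1
--             else:
--                 r+=1
--         ans=min(r-l, ans)
--     return ans
-- ===== SOURCE B (Python) =====
-- def degreeOfArray(nums):
--     # one pass: per element record (count, first index, last index)
--     info = {}
--     for i, num in enumerate(nums):
--         if num in info:
--             c, f, _ = info[num]
--             info[num] = (c + 1, f, i)
--         else:
--             info[num] = (1, i, i)
--     degree = max(c for c, _, _ in info.values())
--     return min(l - f + 1 for c, f, l in info.values() if c == degree)
-- ===== Notes on version B (the rewrite author's own statement) =====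
-- stated objective: alternative
-- what changed: A rescans the array with a two-pointer walk for every maximal-frequency element; B records (count, first index, last index) per element in one dict pass and takes min(last-first+1) over the max-count elements (single pass, no rescans).
-- outside the precondition, e.g. on degreeOfArray([]): A raises ValueError, B raises ValueError
import Mathlib
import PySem

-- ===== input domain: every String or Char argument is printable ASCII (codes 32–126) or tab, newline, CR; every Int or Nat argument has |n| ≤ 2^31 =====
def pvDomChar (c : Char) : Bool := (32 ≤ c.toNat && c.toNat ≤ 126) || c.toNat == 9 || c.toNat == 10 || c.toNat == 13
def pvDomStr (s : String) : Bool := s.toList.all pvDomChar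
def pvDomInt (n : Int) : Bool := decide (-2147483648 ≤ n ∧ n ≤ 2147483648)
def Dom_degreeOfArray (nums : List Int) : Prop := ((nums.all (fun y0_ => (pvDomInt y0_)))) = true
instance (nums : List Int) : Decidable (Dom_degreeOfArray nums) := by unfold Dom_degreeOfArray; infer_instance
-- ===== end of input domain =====

-- B replaces A's per-candidate two-pointer rescan by one pass recording (count, first, last) per element; proved equal on nonempty lists.


-- ===== PORT A =====
-- A's inner while-loop. Every branch advances r, so fuel = nums.length + 1 is never
-- exhausted on the runs A performs (Python raises only on nums = [], excluded by Pre_);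
-- the fuel argument only makes the recursion structural.
def degreeLoopA (nums : List Int) (num : Int) : Nat → Int → Nat → Nat → Int
  | 0, _, l, r => (r : Int) - (l : Int)
  | fuel + 1, k, l, r =>
    if k > 0 then
      if nums.getD l 0 ≠ num ∧ nums.getD r 0 ≠ num then
        degreeLoopA nums num fuel k (l + 1) (r + 1)
      else if nums.getD r 0 = num ∧ nums.getD l 0 = num then
        degreeLoopA nums num fuel (k - 1) l (r + 1)
      else
        degreeLoopA nums num fuel k l (r + 1)
    else (r : Int) - (l : Int)

def degreeOfArray (nums : List Int) : Int :=
  let counter : PySem.Dict Int Int :=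
    nums.foldl
      (fun d num =>
        if d.contains num = false then d.insert num 1 else d.modify num 0 (· + 1))
      PySem.Dict.empty
  let maxValue : Int := (PySem.List.max? counter.values (fun y => y)).getD 0
  let results : List (Int × Int) := counter.items.filter (fun p => p.2 == maxValue)
  let ans : Option Int :=
    results.foldl
      (fun ans p =>
        let span := degreeLoopA nums p.1 (nums.length + 1) p.2 0 0
        some (match ans with | none => span | some a => min span a))
      none
  -- none is Python's untouched float('inf'): unreachable under Pre_ (results ≠ [] when nums ≠ [])
  ans.getD 0

-- ===== PORT B =====
def degreeOfArray_alt (nums : List Int) : Int :=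
  let info : PySem.Dict Int (Int × Int × Int) :=
    (PySem.List.enumerate nums 0).foldl
      (fun d p =>
        match d.get? p.2 with
        | some v => d.insert p.2 (v.1 + 1, v.2.1, p.1)
        | none => d.insert p.2 (1, p.1, p.1))
      PySem.Dict.empty
  let degree : Int := (PySem.List.max? (info.values.map (fun v => v.1)) (fun y => y)).getD 0
  (PySem.List.min?
      ((info.values.filter (fun v => v.1 == degree)).map (fun v => v.2.2 - v.2.1 + 1))
      (fun y => y)).getD 0

-- ===== PRECONDITION & SPEC =====
-- Pre_ excludes only nums = [], where Python's max() raises ValueError (in A and in B).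
def Pre_degreeOfArray (nums : List Int) : Prop := nums ≠ []
instance (nums : List Int) : Decidable (Pre_degreeOfArray nums) := by unfold Pre_degreeOfArray; infer_instance
def pvWitness_degreeOfArray : List Int := [1]
def Spec_degreeOfArray (nums : List Int) (out : Int) : Prop := out = degreeOfArray_alt nums
instance (nums : List Int) (out : Int) : Decidable (Spec_degreeOfArray nums out) := by unfold Spec_degreeOfArray; infer_instance

-- ===== CLAIM (what is proved, stated in full; the proofs are below) =====
def Claim_equal_degreeOfArray : Prop := ∀ (nums : List Int), Dom_degreeOfArray nums → Pre_degreeOfArray nums → Spec_degreeOfArray nums (degreeOfArray nums)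

-- ===== LEMMAS AND PROOFS =====

def pvFirst (nums : List Int) (num : Int) : Nat := nums.idxOf num
def pvLast (nums : List Int) (num : Int) : Nat := nums.length - 1 - nums.reverse.idxOf num

lemma pvBeforeIdxOf (l : List Int) (a : Int) (j : Nat) (hj : j < l.idxOf a) (hl : j < l.length) :
    l[j] ≠ a := by
  intro h
  unfold List.idxOf at hj
  have h2 := List.not_of_lt_findIdx hj
  simp at h2
  exact h2 h

lemma pvFirst_lt (nums : List Int) (num : Int) (hm : num ∈ nums) :
    pvFirst nums num < nums.length := List.idxOf_lt_length_of_mem hm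

lemma pvGet_first (nums : List Int) (num : Int) (hm : num ∈ nums) :
    nums[pvFirst nums num]'(pvFirst_lt nums num hm) = num := List.getElem_idxOf _

lemma pvBefore_first (nums : List Int) (num : Int) (j : Nat) (hl : j < nums.length)
    (hj : j < pvFirst nums num) : nums[j] ≠ num := pvBeforeIdxOf nums num j hj hl

lemma pvLast_lt (nums : List Int) (num : Int) (hm : num ∈ nums) :
    pvLast nums num < nums.length := by
  have : 0 < nums.length := List.length_pos_of_mem hm
  unfold pvLast; omega

lemma pvGet_last (nums : List Int) (num : Int) (hm : num ∈ nums) :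
    nums[pvLast nums num]'(pvLast_lt nums num hm) = num := by
  have hmr : num ∈ nums.reverse := by simpa using hm
  have hj : nums.reverse.idxOf num < nums.length := by
    simpa using List.idxOf_lt_length_of_mem hmr
  have h2 := List.getElem_idxOf (xs := nums.reverse) (x := num) (List.idxOf_lt_length_of_mem hmr)
  rw [List.getElem_reverse] at h2
  simpa [pvLast] using h2

lemma pvAfter_last (nums : List Int) (num : Int) (hm : num ∈ nums) (i : Nat)
    (hi : i < nums.length) (hgt : pvLast nums num < i) : nums[i] ≠ num := by
  have hmr : num ∈ nums.reverse := by simpa using hm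
  have hj : nums.reverse.idxOf num < nums.length := by
    simpa using List.idxOf_lt_length_of_mem hmr
  have hrev : nums.reverse[nums.length - 1 - i]'(by simp; omega) = nums[i] := by
    rw [List.getElem_reverse]
    congr 1
    omega
  have hlt : nums.length - 1 - i < nums.reverse.idxOf num := by
    unfold pvLast at hgt; omega
  have := pvBeforeIdxOf nums.reverse num _ hlt (by simp; omega)
  rw [hrev] at this
  exact this

lemma pvFirst_le_last (nums : List Int) (num : Int) (hm : num ∈ nums) :
    pvFirst nums num ≤ pvLast nums num := by
  by_contra h
  exact pvBefore_first nums num _ (pvLast_lt nums num hm) (by omega) (pvGet_last nums num hm)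

lemma pvMemDrop (nums : List Int) (num : Int) (r i : Nat) (hi : i < nums.length)
    (hri : r ≤ i) (hv : nums[i] = num) : num ∈ nums.drop r := by
  rw [List.mem_iff_getElem]
  refine ⟨i - r, by simp [List.length_drop]; omega, ?_⟩
  rw [List.getElem_drop]
  simpa [Nat.add_sub_cancel' hri] using hv

lemma pvLe_last_of_mem_drop (nums : List Int) (num : Int) (hm : num ∈ nums) (r : Nat)
    (h : num ∈ nums.drop r) : r ≤ pvLast nums num := by
  rw [List.mem_iff_getElem] at h
  obtain ⟨i, hi, hv⟩ := h
  rw [List.getElem_drop] at hv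
  have hlen : r + i < nums.length := by simp at hi; omega
  by_contra hc
  exact pvAfter_last nums num hm (r + i) hlen (by omega) hv

lemma pvLoop2 (nums : List Int) (num : Int) (hm : num ∈ nums) :
    ∀ (fuel : Nat) (k : Int) (l r : Nat), nums.length - r ≤ fuel →
      (hl : l < nums.length) → nums[l] = num → r ≤ pvLast nums num + 1 →
      k = ((nums.drop r).count num : Int) →
      degreeLoopA nums num fuel k l r = (pvLast nums num : Int) + 1 - (l : Int) := by
  intro fuel
  induction fuel with
  | zero =>
    intro k l r hfuel hl hval hr hk
    have hL := pvLast_lt nums num hm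
    have : r = pvLast nums num + 1 := by omega
    simp only [degreeLoopA, this]
    push_cast
    ring
  | succ fuel ih =>
    intro k l r hfuel hl hval hr hk
    have hgl : nums.getD l 0 = num := by rw [List.getD_eq_getElem _ _ hl]; exact hval
    by_cases hkpos : k > 0
    · have hcnt : 0 < (nums.drop r).count num := by omega
      have hmemd : num ∈ nums.drop r := List.count_pos_iff.mp hcnt
      have hrL : r ≤ pvLast nums num := pvLe_last_of_mem_drop nums num hm r hmemd
      have hrlen : r < nums.length := lt_of_le_of_lt hrL (pvLast_lt nums num hm)
      have hdropc : nums.drop r = nums[r] :: nums.drop (r + 1) := List.drop_eq_getElem_cons hrlen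
      rw [degreeLoopA, if_pos hkpos, if_neg (by intro hcon; exact hcon.1 hgl)]
      by_cases hgr : nums.getD r 0 = num
      · rw [if_pos ⟨hgr, hgl⟩]
        have hgetr : nums[r] = num := by rwa [List.getD_eq_getElem _ _ hrlen] at hgr
        have hknew : k - 1 = (((nums.drop (r + 1)).count num : Nat) : Int) := by
          rw [hdropc, List.count_cons] at hk
          simp [hgetr] at hk
          omega
        exact ih (k - 1) l (r + 1) (by omega) hl hval (by omega) hknew
      · rw [if_neg (by intro hcon; exact hgr hcon.1)]
        have hgetr : nums[r] ≠ num := by rwa [List.getD_eq_getElem _ _ hrlen] at hgr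
        have hknew : k = (((nums.drop (r + 1)).count num : Nat) : Int) := by
          rw [hdropc, List.count_cons] at hk
          simp [hgetr] at hk
          omega
        exact ih k l (r + 1) (by omega) hl hval (by omega) hknew
    · -- k = 0
      have hcnt0 : (nums.drop r).count num = 0 := by omega
      have hnm : num ∉ nums.drop r := by
        rw [← List.count_eq_zero]; exact hcnt0
      have hrL : pvLast nums num + 1 ≤ r := by
        by_contra hc
        exact hnm (pvMemDrop nums num r (pvLast nums num) (pvLast_lt nums num hm)
          (by omega) (pvGet_last nums num hm))
      have hreq : r = pvLast nums num + 1 := by omega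
      rw [degreeLoopA, if_neg hkpos, hreq]
      push_cast
      ring

lemma pvLoop1 (nums : List Int) (num : Int) (hm : num ∈ nums) :
    ∀ (fuel : Nat) (r : Nat), nums.length - r ≤ fuel → r ≤ pvFirst nums num →
      degreeLoopA nums num fuel (((nums.drop r).count num : Nat) : Int) r r
        = (pvLast nums num : Int) + 1 - (pvFirst nums num : Int) := by
  intro fuel
  induction fuel with
  | zero =>
    intro r hfuel hr
    have := pvFirst_lt nums num hm
    omega
  | succ fuel ih =>
    intro r hfuel hr
    have hf := pvFirst_lt nums num hm
    have hrlen : r < nums.length := by omega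
    have hmemd : num ∈ nums.drop r :=
      pvMemDrop nums num r (pvFirst nums num) hf hr (pvGet_first nums num hm)
    have hcnt : 0 < (nums.drop r).count num := List.count_pos_iff.mpr hmemd
    have hkpos : (((nums.drop r).count num : Nat) : Int) > 0 := by omega
    have hdropc : nums.drop r = nums[r] :: nums.drop (r + 1) := List.drop_eq_getElem_cons hrlen
    by_cases hrf : r = pvFirst nums num
    · have hgetr : nums[r]'hrlen = num := by subst hrf; exact pvGet_first nums num hm
      have hgl : nums.getD r 0 = num := by
        rw [List.getD_eq_getElem _ _ hrlen]; exact hgetr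
      rw [degreeLoopA, if_pos hkpos, if_neg (by intro hcon; exact hcon.1 hgl), if_pos ⟨hgl, hgl⟩]
      have hknew : (((nums.drop r).count num : Nat) : Int) - 1
          = (((nums.drop (r + 1)).count num : Nat) : Int) := by
        rw [hdropc, List.count_cons]
        simp [hgetr]
      rw [hknew]
      have h2 := pvLoop2 nums num hm fuel _ r (r + 1) (by omega) hrlen
        hgetr (by have := pvFirst_le_last nums num hm; omega) rfl
      rw [h2, hrf]
    · have hgr : nums[r] ≠ num := pvBefore_first nums num r hrlen (by omega)
      have hgl : nums.getD r 0 ≠ num := by rw [List.getD_eq_getElem _ _ hrlen]; exact hgr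
      rw [degreeLoopA, if_pos hkpos, if_pos ⟨hgl, hgl⟩]
      have hknew : (nums.drop r).count num = (nums.drop (r + 1)).count num := by
        rw [hdropc, List.count_cons]
        simp [hgr]
      rw [hknew]
      exact ih (r + 1) (by omega) (by omega)

lemma pvLoopSpec (nums : List Int) (num : Int) (hm : num ∈ nums) :
    degreeLoopA nums num (nums.length + 1) ((nums.count num : Nat) : Int) 0 0
      = (pvLast nums num : Int) - (pvFirst nums num : Int) + 1 := by
  have h := pvLoop1 nums num hm (nums.length + 1) 0 (by omega) (Nat.zero_le _)
  rw [List.drop_zero] at h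
  rw [h]
  ring

lemma pvCounterA (nums : List Int) :
    nums.foldl
      (fun d num =>
        if d.contains num = false then d.insert num 1 else d.modify num 0 (· + 1))
      PySem.Dict.empty = PySem.Dict.counter nums := by
  have hstep : (fun (d : PySem.Dict Int Int) num =>
      if d.contains num = false then d.insert num 1 else d.modify num 0 (· + 1))
      = fun d num => d.modify num 0 (· + 1) := by
    funext d num
    by_cases h : d.contains num
    · simp [h]
    · have h' : d.contains num = false := by simpa using h
      simp only [h', PySem.Dict.modify, PySem.Dict.getD_of_not_contains d 0 h']
      norm_num
  rw [hstep, PySem.Dict.counter_eq_foldl]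

def pvStepB (d : PySem.Dict Int (Int × Int × Int)) (p : Int × Int) :
    PySem.Dict Int (Int × Int × Int) :=
  match d.get? p.2 with
  | some v => d.insert p.2 (v.1 + 1, v.2.1, p.1)
  | none => d.insert p.2 (1, p.1, p.1)

lemma pvFirst_append_mem (xs : List Int) (x k : Int) (h : k ∈ xs) :
    pvFirst (xs ++ [x]) k = pvFirst xs k := List.idxOf_append_of_mem h

lemma pvFirst_append_self (xs : List Int) (x : Int) (h : x ∉ xs) :
    pvFirst (xs ++ [x]) x = xs.length := by
  simp [pvFirst, List.idxOf_append_of_notMem h]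

lemma pvLast_append_self (xs : List Int) (x : Int) : pvLast (xs ++ [x]) x = xs.length := by
  simp [pvLast, List.reverse_append]

lemma pvLast_append_ne (xs : List Int) (x k : Int) (hne : k ≠ x) (h : k ∈ xs) :
    pvLast (xs ++ [x]) k = pvLast xs k := by
  have hj : xs.reverse.idxOf k < xs.length := by
    simpa using List.idxOf_lt_length_of_mem (by simpa using h : k ∈ xs.reverse)
  have hstep : List.idxOf k (x :: xs.reverse) = List.idxOf k xs.reverse + 1 :=
    List.idxOf_cons_ne xs.reverse (id (Ne.symm hne))
  simp [pvLast, List.reverse_append, hstep]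
  omega

lemma pvInfo_get? (nums : List Int) : ∀ (k : Int),
    ((PySem.List.enumerate nums 0).foldl pvStepB PySem.Dict.empty).get? k
      = if k ∈ nums then
          some (((nums.count k : Nat) : Int), ((pvFirst nums k : Nat) : Int), ((pvLast nums k : Nat) : Int))
        else none := by
  induction nums using List.reverseRecOn with
  | nil => intro k; simp [PySem.List.enumerate_nil, PySem.Dict.get?_empty]
  | append_singleton xs x ih =>
    intro k
    rw [PySem.List.enumerate_append, List.foldl_append]
    simp only [PySem.List.enumerate_cons, PySem.List.enumerate_nil, List.foldl_cons, List.foldl_nil]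
    rw [pvStepB.eq_def]
    dsimp only
    rw [ih x]
    by_cases hx : x ∈ xs
    · rw [if_pos hx]
      rw [PySem.Dict.get?_insert, ih k]
      by_cases hkx : k = x
      · subst hkx
        rw [if_pos rfl, if_pos (by simp)]
        have h1 : (xs ++ [k]).count k = xs.count k + 1 := by simp
        have h2 : pvFirst (xs ++ [k]) k = pvFirst xs k := pvFirst_append_mem xs k k hx
        have h3 : pvLast (xs ++ [k]) k = xs.length := pvLast_append_self xs k
        rw [h1, h2, h3]
        push_cast
        ring_nf
      · rw [if_neg hkx]
        by_cases hk : k ∈ xs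
        · rw [if_pos hk, if_pos (by simp [hk])]
          have h1 : (xs ++ [x]).count k = xs.count k := by simp [Ne.symm hkx]
          have h2 : pvFirst (xs ++ [x]) k = pvFirst xs k := pvFirst_append_mem xs x k hk
          have h3 : pvLast (xs ++ [x]) k = pvLast xs k := pvLast_append_ne xs x k hkx hk
          rw [h1, h2, h3]
        · rw [if_neg hk, if_neg (by simp [hkx, hk])]
    · rw [if_neg hx]
      rw [PySem.Dict.get?_insert, ih k]
      by_cases hkx : k = x
      · subst hkx
        rw [if_pos rfl, if_pos (by simp)]
        have h1 : (xs ++ [k]).count k = 1 := by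
          simp [List.count_eq_zero_of_not_mem hx]
        have h2 : pvFirst (xs ++ [k]) k = xs.length := pvFirst_append_self xs k hx
        have h3 : pvLast (xs ++ [k]) k = xs.length := pvLast_append_self xs k
        rw [h1, h2, h3]
        norm_num
      · rw [if_neg hkx]
        by_cases hk : k ∈ xs
        · rw [if_pos hk, if_pos (by simp [hk])]
          have h1 : (xs ++ [x]).count k = xs.count k := by simp [Ne.symm hkx]
          have h2 : pvFirst (xs ++ [x]) k = pvFirst xs k := pvFirst_append_mem xs x k hk
          have h3 : pvLast (xs ++ [x]) k = pvLast xs k := pvLast_append_ne xs x k hkx hk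
          rw [h1, h2, h3]
        · rw [if_neg hk, if_neg (by simp [hkx, hk])]

lemma pvFoldMin (xs : List Int) :
    xs.foldl (fun a x => some (match a with | none => x | some v => min x v)) none
      = PySem.List.min? xs (fun y => y) := by
  have aux : ∀ (t : List Int) (a : Int),
      t.foldl (fun a x => some (match a with | none => x | some v => min x v)) (some a)
        = some (t.foldl min a) := by
    intro t
    induction t with
    | nil => intro a; rfl
    | cons x t ih => intro a; simp only [List.foldl_cons, ih, min_comm]
  cases xs with
  | nil => rfl
  | cons x t =>
    rw [PySem.List.min?_id_cons]
    simpa using aux t x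

def pvValB (d : PySem.Dict Int (Int × Int × Int)) (p : Int × Int) : Int × Int × Int :=
  match d.get? p.2 with
  | some v => (v.1 + 1, v.2.1, p.1)
  | none => (1, p.1, p.1)

lemma pvStepB_eq_insert : pvStepB = fun d p => d.insert p.2 (pvValB d p) := by
  funext d p
  unfold pvStepB pvValB
  cases h : d.get? p.2 <;> simp

lemma pvInfo_keys (nums : List Int) :
    ((PySem.List.enumerate nums 0).foldl pvStepB PySem.Dict.empty).keys
      = PySem.Set.ofList nums := by
  rw [pvStepB_eq_insert]
  rw [PySem.Dict.keys_foldl_insert_key]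
  simp [PySem.Dict.keys_empty, PySem.List.map_snd_enumerate, PySem.Set.update_nil_left]

lemma pvInfo_nodup (nums : List Int) :
    ((PySem.List.enumerate nums 0).foldl pvStepB PySem.Dict.empty).keys.Nodup := by
  rw [pvStepB_eq_insert]
  exact PySem.Dict.nodup_keys_foldl_insert_key _ _ _ _ PySem.Dict.nodup_keys_empty

lemma pvInfo_values (nums : List Int) :
    ((PySem.List.enumerate nums 0).foldl pvStepB PySem.Dict.empty).values
      = (PySem.Set.ofList nums).map (fun k =>
          (((nums.count k : Nat) : Int), ((pvFirst nums k : Nat) : Int), ((pvLast nums k : Nat) : Int))) := by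
  rw [PySem.Dict.values_eq_map_keys _ (pvInfo_nodup nums) (0, 0, 0), pvInfo_keys]
  apply List.map_congr_left
  intro k hk
  have hkm : k ∈ nums := (PySem.Set.mem_ofList nums k).mp hk
  rw [PySem.Dict.getD_eq_get?_getD, pvInfo_get? nums k, if_pos hkm]
  rfl


lemma pvCounter_values (nums : List Int) :
    (PySem.Dict.counter nums : PySem.Dict Int Int).values
      = (PySem.Set.ofList nums).map (fun k => ((nums.count k : Nat) : Int)) := by
  simp [PySem.Dict.values, PySem.Dict.items_counter, List.map_map, Function.comp]

theorem pvMain (nums : List Int) : degreeOfArray nums = degreeOfArray_alt nums := by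
  simp only [degreeOfArray, degreeOfArray_alt]
  rw [pvCounterA]
  rw [show (fun (d : PySem.Dict Int (Int × Int × Int)) (p : Int × Int) =>
      match d.get? p.2 with
      | some v => d.insert p.2 (v.1 + 1, v.2.1, p.1)
      | none => d.insert p.2 (1, p.1, p.1)) = pvStepB from rfl]
  rw [pvInfo_values nums, pvCounter_values nums, PySem.Dict.items_counter]
  simp only [List.map_map, List.filter_map, Function.comp_def, List.foldl_map]
  rw [PySem.List.foldl_congr_mem _ _
      (fun (a : Option Int) (k : Int) => some (match a with
        | none => ((pvLast nums k : Nat) : Int) - ((pvFirst nums k : Nat) : Int) + 1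
        | some x => min (((pvLast nums k : Nat) : Int) - ((pvFirst nums k : Nat) : Int) + 1) x))
      none
      (by
        intro acc k hk
        have hkn : k ∈ nums := (PySem.Set.mem_ofList nums k).mp (List.mem_filter.mp hk).1
        rw [pvLoopSpec nums k hkn])]
  rw [← List.foldl_map
      (f := fun k : Int => ((pvLast nums k : Nat) : Int) - ((pvFirst nums k : Nat) : Int) + 1)
      (g := fun (a : Option Int) (x : Int) => some (match a with | none => x | some v => min x v))]
  rw [pvFoldMin]

-- ===== VERDICT (by name: the statement is the Claim_ definition above) =====
theorem degreeOfArray_spec : Claim_equal_degreeOfArray := by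
  intro nums _hDom _hPre
  show degreeOfArray nums = degreeOfArray_alt nums
  exact pvMain nums
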